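-- pv_equiv track=rewrite | github.com/KoyoJimbo/WordCards | super_ui_modules.py | back_fanc
-- ===== SOURCE A (Python) =====
-- def back_fanc(ans, w_e, num):
--     back = ''
--     ans_tail = len(ans) - 1
--     w_e_tail = len(w_e[num]) - 1
--     # while 前方の条件２つはw_e[-1]となりw_eの後方を検索しないためです。
--     while ans_tail >= 0 and  w_e_tail >= 0 and\
--         ans[ans_tail] == w_e[num][w_e_tail]:
--         back += ans[ans_tail]
--         ans_tail -= 1
--         w_e_tail -= 1
--     return back
-- ===== SOURCE B (Python) =====
-- def back_fanc(ans, w_e, num):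
--     r1 = ans[::-1]
--     r2 = w_e[num][::-1]
--     i = next((k for k, (a, b) in enumerate(zip(r1, r2)) if a != b),
--              min(len(r1), len(r2)))
--     return r1[:i]
-- ===== Notes on version B (the rewrite author's own statement) =====
-- stated objective: idiomatic
-- what changed: Replaces the backward index-decrement while loop that accumulates characters with a transform-then-prefix computation: reverse both strings and slice the first at their longest-common-prefix length (first mismatch found by a generator over the zipped reversals).
import Mathlib
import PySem

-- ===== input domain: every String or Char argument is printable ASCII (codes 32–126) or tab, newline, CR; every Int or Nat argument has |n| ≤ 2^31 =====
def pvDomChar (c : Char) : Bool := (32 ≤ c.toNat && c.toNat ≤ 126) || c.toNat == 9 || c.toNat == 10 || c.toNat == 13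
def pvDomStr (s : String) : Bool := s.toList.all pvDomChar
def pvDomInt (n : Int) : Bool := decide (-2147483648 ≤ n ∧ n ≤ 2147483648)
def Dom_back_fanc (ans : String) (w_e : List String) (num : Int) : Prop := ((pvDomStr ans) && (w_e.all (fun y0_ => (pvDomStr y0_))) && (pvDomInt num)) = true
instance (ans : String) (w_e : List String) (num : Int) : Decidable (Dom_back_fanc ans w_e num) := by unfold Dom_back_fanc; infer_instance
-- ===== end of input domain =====

-- B is the idiomatic rewrite: reverse both strings and take the longest common prefix,
-- instead of A's backward index-decrement accumulation loop.

-- ===== PORT A =====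
-- the while loop; i = ans_tail + 1, j = w_e_tail + 1 (so 0 encodes tail < 0)
def backFancLoop (a w : List Char) : Nat → Nat → List Char → List Char
  | i + 1, j + 1, acc =>
      match a[i]?, w[j]? with
      | some c1, some c2 =>
          if c1 == c2 then backFancLoop a w i j (acc ++ [c1]) else acc
      | _, _ => acc
  | _, _, acc => acc

def back_fanc (ans : String) (w_e : List String) (num : Int) : String :=
  match PySem.List.pyGet? w_e num with
  | none => ""   -- IndexError in Python: outside Pre_
  | some w =>
      String.mk (backFancLoop ans.toList w.toList ans.toList.length w.toList.length [])

-- ===== PORT B =====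
-- index of the first mismatch of two lists (min of the lengths if none): B's 'next(...)'
def firstMismatch : List Char → List Char → Nat
  | a :: as, b :: bs => if a == b then firstMismatch as bs + 1 else 0
  | _, _ => 0

def back_fanc_alt (ans : String) (w_e : List String) (num : Int) : String :=
  match PySem.List.pyGet? w_e num with
  | none => ""   -- IndexError in Python: outside Pre_
  | some w =>
      let r1 := ans.toList.reverse
      let r2 := w.toList.reverse
      String.mk (r1.take (firstMismatch r1 r2))

-- ===== PRECONDITION & SPEC =====
-- Pre_ excludes exactly the inputs where Python's w_e[num] raises IndexError (both A and B raise there).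
def Pre_back_fanc (ans : String) (w_e : List String) (num : Int) : Prop :=
  PySem.Raise.InRange w_e.length num
instance (ans : String) (w_e : List String) (num : Int) : Decidable (Pre_back_fanc ans w_e num) := by unfold Pre_back_fanc; infer_instance
def pvWitness_back_fanc : String × List String × Int := ("stack", ["back"], 0)

def Spec_back_fanc (ans : String) (w_e : List String) (num : Int) (out : String) : Prop := out = back_fanc_alt ans w_e num
instance (ans : String) (w_e : List String) (num : Int) (out : String) : Decidable (Spec_back_fanc ans w_e num out) := by unfold Spec_back_fanc; infer_instance

-- ===== CLAIM (what is proved, stated in full; the proofs are below) =====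
def Claim_equal_back_fanc : Prop := ∀ (ans : String) (w_e : List String) (num : Int), Dom_back_fanc ans w_e num → Pre_back_fanc ans w_e num → Spec_back_fanc ans w_e num (back_fanc ans w_e num)

-- ===== LEMMAS AND PROOFS =====

-- the common prefix of two lists, as a list
def cpList : List Char → List Char → List Char
  | a :: as, b :: bs => if a == b then a :: cpList as bs else []
  | _, _ => []

theorem take_firstMismatch (x y : List Char) : x.take (firstMismatch x y) = cpList x y := by
  induction x generalizing y with
  | nil => cases y <;> simp [firstMismatch, cpList]
  | cons a as ih =>
      cases y with
      | nil => simp [firstMismatch, cpList]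
      | cons b bs =>
          by_cases h : a == b <;> simp [firstMismatch, cpList, h, ih]

theorem cpList_nil_right (x : List Char) : cpList x [] = [] := by
  cases x <;> simp [cpList]

theorem take_succ_reverse (a : List Char) (i : Nat) (h : i < a.length) :
    (a.take (i + 1)).reverse = a[i] :: (a.take i).reverse := by
  rw [List.take_succ]
  simp [List.getElem?_eq_getElem h]

theorem backFancLoop_eq (a w : List Char) (i j : Nat) (acc : List Char)
    (hi : i ≤ a.length) (hj : j ≤ w.length) :
    backFancLoop a w i j acc = acc ++ cpList ((a.take i).reverse) ((w.take j).reverse) := by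
  induction i generalizing j acc with
  | zero => simp [backFancLoop, cpList]
  | succ i ih =>
      cases j with
      | zero => simp [backFancLoop, cpList_nil_right]
      | succ j =>
          have hi' : i < a.length := by omega
          have hj' : j < w.length := by omega
          rw [take_succ_reverse a i hi', take_succ_reverse w j hj']
          show (match a[i]?, w[j]? with
                | some c1, some c2 =>
                    if c1 == c2 then backFancLoop a w i j (acc ++ [c1]) else acc
                | _, _ => acc) = _
          rw [List.getElem?_eq_getElem hi', List.getElem?_eq_getElem hj']
          by_cases h : a[i] == w[j]
          · simp only [h, if_pos, cpList]
            rw [ih j (acc ++ [a[i]]) (by omega) (by omega)]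
            simp [h]
          · simp [cpList, h]

theorem cpList_reverse_full (a w : List Char) :
    backFancLoop a w a.length w.length [] = cpList a.reverse w.reverse := by
  rw [backFancLoop_eq a w a.length w.length [] le_rfl le_rfl]
  simp

-- ===== VERDICT (by name: the statement is the Claim_ definition above) =====
theorem back_fanc_spec : Claim_equal_back_fanc := by
  intro ans w_e num _ hpre
  unfold Spec_back_fanc back_fanc back_fanc_alt
  obtain ⟨w, hw⟩ : ∃ w, PySem.List.pyGet? w_e num = some w := by
    cases h : PySem.List.pyGet? w_e num with
    | none => exact absurd hpre ((PySem.List.pyGet?_eq_none_iff _ _).mp h)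
    | some w => exact ⟨w, rfl⟩
  rw [hw]
  simp only [take_firstMismatch, cpList_reverse_full]
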